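-- pv_equiv track=rewrite | github.com/ethair28/PMR | pmr/editor_payloads.py | _dominant_geography_token
-- ===== SOURCE A (Python) =====
-- def _dominant_geography_token(tokens: tuple[str, ...]) -> str | None:
--     counts: dict[str, int] = {}
--     for token in tokens:
--         normalized = _GEOGRAPHY_ALIASES.get(token, token)
--         if normalized in _GEOGRAPHY_TOKENS:
--             counts[normalized] = counts.get(normalized, 0) + 1
--     if not counts:
--         return None
--     return max(counts.items(), key=lambda item: (item[1], item[0]))[0]
--
-- _GEOGRAPHY_ALIASES = {
--     "us": "united_states",
--     "u": "united_states",
--     "s": "united_states",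
--     "u.s": "united_states",
--     "u.s.": "united_states",
--     "usa": "united_states",
--     "american": "united_states",
-- }
--
-- _GEOGRAPHY_TOKENS = {
--     "iran",
--     "slovenia",
--     "denmark",
--     "china",
--     "lebanon",
--     "israel",
--     "somalia",
--     "lyon",
--     "france",
--     "italy",
--     "united_states",
-- }
-- ===== SOURCE B (Python) =====
-- _GEOGRAPHY_ALIASES = {
--     "us": "united_states",
--     "u": "united_states",
--     "s": "united_states",
--     "u.s": "united_states",
--     "u.s.": "united_states",
--     "usa": "united_states",
--     "american": "united_states",
-- }
--
-- _GEOGRAPHY_TOKENS = {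
--     "iran",
--     "slovenia",
--     "denmark",
--     "china",
--     "lebanon",
--     "israel",
--     "somalia",
--     "lyon",
--     "france",
--     "italy",
--     "united_states",
-- }
--
-- _CANDIDATES = sorted(_GEOGRAPHY_TOKENS)
--
--
-- def _dominant_geography_token(tokens):
--     normalized = [_GEOGRAPHY_ALIASES.get(t, t) for t in tokens]
--     present = [c for c in _CANDIDATES if c in normalized]
--     if not present:
--         return None
--     return max(present, key=lambda c: (normalized.count(c), c))
-- ===== Notes on version B (the rewrite author's own statement) =====
-- stated objective: alternative
-- what changed: Replaces the single-pass dict-of-counts build and max over dict items by normalizing once, filtering the fixed sorted candidate list for presence, and re-scanning the normalized list with .count per candidate inside max with a (count, name) key.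
import Mathlib
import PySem

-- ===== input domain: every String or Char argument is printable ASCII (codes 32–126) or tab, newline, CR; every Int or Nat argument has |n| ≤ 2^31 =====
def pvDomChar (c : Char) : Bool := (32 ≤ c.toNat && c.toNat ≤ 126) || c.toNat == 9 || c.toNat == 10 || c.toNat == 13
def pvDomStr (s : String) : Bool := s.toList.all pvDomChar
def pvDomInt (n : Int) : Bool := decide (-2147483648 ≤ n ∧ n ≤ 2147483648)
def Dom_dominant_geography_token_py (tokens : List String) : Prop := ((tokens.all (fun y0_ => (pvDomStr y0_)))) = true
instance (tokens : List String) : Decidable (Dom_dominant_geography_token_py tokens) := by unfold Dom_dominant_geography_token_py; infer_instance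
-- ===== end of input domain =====

-- B replaces A's one-pass dict-of-counts with a scan of the fixed sorted candidate list using repeated .count
-- over the once-normalized token list (objective: alternative decomposition, same observable result).

-- ===== PORT A =====
-- _GEOGRAPHY_ALIASES (module constant shared by both implementations)
def pvGeoAliases : PySem.Dict String String := PySem.Dict.ofList
  [("us", "united_states"), ("u", "united_states"), ("s", "united_states"),
   ("u.s", "united_states"), ("u.s.", "united_states"), ("usa", "united_states"),
   ("american", "united_states")]

-- literal elements of the _GEOGRAPHY_TOKENS set, in source order
def pvGeoLits : List String :=
  ["iran", "slovenia", "denmark", "china", "lebanon", "israel", "somalia",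
   "lyon", "france", "italy", "united_states"]

-- _GEOGRAPHY_TOKENS (module constant shared by both implementations)
def pvGeoTokens : PySem.Set String := PySem.Set.ofList pvGeoLits

def dominant_geography_token_py (tokens : List String) : Option String :=
  let counts : PySem.Dict String Int := tokens.foldl
    (fun d token =>
      let normalized := pvGeoAliases.getD token token
      if PySem.Set.contains pvGeoTokens normalized then d.modify normalized 0 (· + 1) else d)
    PySem.Dict.empty
  if counts.items.isEmpty then none
  else (PySem.List.max2? counts.items (fun it => it.2) (fun it => it.1)).map (fun it => it.1)

-- ===== PORT B =====
-- _CANDIDATES = sorted(_GEOGRAPHY_TOKENS)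
def pvCandidates : List String := PySem.List.sorted pvGeoTokens (fun x => x) false

def dominant_geography_token_py_alt (tokens : List String) : Option String :=
  let normalized := tokens.map (fun t => pvGeoAliases.getD t t)
  let present := pvCandidates.filter (fun c => normalized.contains c)
  if present.isEmpty then none
  else PySem.List.max2? present (fun c => (normalized.count c : Int)) (fun c => c)

-- ===== PRECONDITION & SPEC =====
def Spec_dominant_geography_token_py (tokens : List String) (out : Option String) : Prop := out = dominant_geography_token_py_alt tokens
instance (tokens : List String) (out : Option String) : Decidable (Spec_dominant_geography_token_py tokens out) := by unfold Spec_dominant_geography_token_py; infer_instance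

-- ===== CLAIM (what is proved, stated in full; the proofs are below) =====
def Claim_equal_dominant_geography_token_py : Prop := ∀ (tokens : List String), Dom_dominant_geography_token_py tokens → Spec_dominant_geography_token_py tokens (dominant_geography_token_py tokens)

-- ===== LEMMAS AND PROOFS =====

-- normalization and the geography test, as used by both ports
def pvNorm (t : String) : String := pvGeoAliases.getD t t

def pvP (x : String) : Bool := PySem.Set.contains pvGeoTokens x

-- Python's (count, name) tuple order, generic in the element type
def pvKeyLe {α : Type} (k1 : α → Int) (k2 : α → String) (a b : α) : Prop :=
  k1 a < k1 b ∨ (k1 a = k1 b ∧ k2 a ≤ k2 b)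

lemma pvKeyLe_refl {α : Type} (k1 : α → Int) (k2 : α → String) (a : α) : pvKeyLe k1 k2 a a :=
  Or.inr ⟨rfl, le_refl _⟩

lemma pvKeyLe_trans {α : Type} (k1 : α → Int) (k2 : α → String) {a b c : α}
    (h : pvKeyLe k1 k2 a b) (g : pvKeyLe k1 k2 b c) : pvKeyLe k1 k2 a c := by
  rcases h with h | ⟨h1, h2⟩ <;> rcases g with g | ⟨g1, g2⟩
  · exact Or.inl (h.trans g)
  · exact Or.inl (g1 ▸ h)
  · exact Or.inl (h1 ▸ g)
  · exact Or.inr ⟨h1.trans g1, h2.trans g2⟩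

-- the accumulator step of PySem.List.max2?
def pvStep {α : Type} (k1 : α → Int) (k2 : α → String) (acc : Option α) (x : α) : Option α :=
  match acc with
  | none => some x
  | some m =>
    if (decide (k1 m < k1 x) || !decide (k1 x < k1 m) && decide (k2 m < k2 x)) = true then some x else some m

lemma pvMax2_eq_foldl {α : Type} (k1 : α → Int) (k2 : α → String) (xs : List α) :
    PySem.List.max2? xs k1 k2 = xs.foldl (pvStep k1 k2) none := rfl

lemma pvStep_some {α : Type} (k1 : α → Int) (k2 : α → String) (a x : α) :
    pvStep k1 k2 (some a) x =
      if k1 a < k1 x ∨ (k1 a = k1 x ∧ k2 a < k2 x) then some x else some a := by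
  unfold pvStep
  by_cases h1 : k1 a < k1 x
  · simp [h1]
  · by_cases h2 : k1 x < k1 a
    · simp [h1, h2, ne_of_gt h2]
    · have he : k1 a = k1 x := le_antisymm (not_lt.mp h2) (not_lt.mp h1)
      by_cases h3 : k2 a < k2 x <;> simp [h3, he]

lemma pvNotLt {α : Type} (k1 : α → Int) (k2 : α → String) {a x : α}
    (h : ¬(k1 a < k1 x ∨ (k1 a = k1 x ∧ k2 a < k2 x))) : pvKeyLe k1 k2 x a := by
  have h1 : ¬ k1 a < k1 x := fun hh => h (Or.inl hh)
  have h2 : k1 a = k1 x → ¬ k2 a < k2 x := fun he hh => h (Or.inr ⟨he, hh⟩)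
  rcases lt_trichotomy (k1 x) (k1 a) with g | g | g
  · exact Or.inl g
  · exact Or.inr ⟨g, not_lt.mp (h2 g.symm)⟩
  · exact absurd g h1

lemma pvFoldl_spec {α : Type} (k1 : α → Int) (k2 : α → String) :
    ∀ (xs : List α) (a : α), ∃ m, xs.foldl (pvStep k1 k2) (some a) = some m ∧
      (m = a ∨ m ∈ xs) ∧ pvKeyLe k1 k2 a m ∧ ∀ y ∈ xs, pvKeyLe k1 k2 y m := by
  intro xs
  induction xs with
  | nil =>
    intro a
    exact ⟨a, rfl, Or.inl rfl, pvKeyLe_refl k1 k2 a, by simp⟩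
  | cons x t ih =>
    intro a
    rw [List.foldl_cons, pvStep_some]
    split_ifs with h
    · obtain ⟨m, hm, hmem, hx, hall⟩ := ih x
      have hax : pvKeyLe k1 k2 a m := by
        refine pvKeyLe_trans k1 k2 ?_ hx
        rcases h with h | ⟨h1, h2⟩
        · exact Or.inl h
        · exact Or.inr ⟨h1, le_of_lt h2⟩
      refine ⟨m, hm, ?_, hax, ?_⟩
      · rcases hmem with rfl | hmem
        · exact Or.inr (List.mem_cons_self ..)
        · exact Or.inr (List.mem_cons_of_mem _ hmem)
      · intro y hy
        rcases List.mem_cons.mp hy with rfl | hy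
        · exact hx
        · exact hall y hy
    · obtain ⟨m, hm, hmem, ha, hall⟩ := ih a
      have hxm : pvKeyLe k1 k2 x m := pvKeyLe_trans k1 k2 (pvNotLt k1 k2 h) ha
      refine ⟨m, hm, ?_, ha, ?_⟩
      · rcases hmem with rfl | hmem
        · exact Or.inl rfl
        · exact Or.inr (List.mem_cons_of_mem _ hmem)
      · intro y hy
        rcases List.mem_cons.mp hy with rfl | hy
        · exact hxm
        · exact hall y hy

lemma pvMax2_spec {α : Type} (k1 : α → Int) (k2 : α → String) {xs : List α} {m : α}
    (h : PySem.List.max2? xs k1 k2 = some m) : m ∈ xs ∧ ∀ y ∈ xs, pvKeyLe k1 k2 y m := by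
  rw [pvMax2_eq_foldl] at h
  cases xs with
  | nil => simp at h
  | cons x t =>
    rw [List.foldl_cons] at h
    obtain ⟨m', hm', hmem, hx, hall⟩ := pvFoldl_spec k1 k2 t x
    rw [show pvStep k1 k2 none x = some x from rfl] at h
    rw [hm'] at h
    cases h
    constructor
    · rcases hmem with rfl | hmem
      · exact List.mem_cons_self ..
      · exact List.mem_cons_of_mem _ hmem
    · intro y hy
      rcases List.mem_cons.mp hy with rfl | hy
      · exact hx
      · exact hall y hy

lemma pvMax2_some {α : Type} (k1 : α → Int) (k2 : α → String) {xs : List α}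
    (h : xs ≠ []) : ∃ m, PySem.List.max2? xs k1 k2 = some m := by
  cases xs with
  | nil => exact absurd rfl h
  | cons x t =>
    rw [pvMax2_eq_foldl, List.foldl_cons]
    obtain ⟨m, hm, -⟩ := pvFoldl_spec k1 k2 t x
    exact ⟨m, hm⟩

-- membership facts about the literal geography data
lemma pvP_iff (c : String) : pvP c = true ↔ c ∈ pvGeoLits := by
  unfold pvP pvGeoTokens
  rw [show PySem.Set.contains (PySem.Set.ofList pvGeoLits) c = List.contains (PySem.Set.ofList pvGeoLits) c from rfl]
  rw [List.contains_iff_mem, PySem.Set.mem_ofList]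

lemma pvMem_candidates (c : String) : c ∈ pvCandidates ↔ c ∈ pvGeoLits := by
  unfold pvCandidates pvGeoTokens
  rw [PySem.List.mem_sorted, PySem.Set.mem_ofList]

-- A's count dict is Counter(filter(geo, normalized))
lemma pvCounts_eq (tokens : List String) :
    tokens.foldl
      (fun d token =>
        let normalized := pvGeoAliases.getD token token
        if PySem.Set.contains pvGeoTokens normalized then d.modify normalized 0 (· + 1) else d)
      PySem.Dict.empty
    = PySem.Dict.counter ((tokens.map pvNorm).filter pvP) := by
  rw [PySem.Dict.counter_eq_foldl, ← PySem.List.foldl_if_eq_foldl_filter, List.foldl_map]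
  rfl

-- ===== VERDICT (by name: the statement is the Claim_ definition above) =====
theorem dominant_geography_token_py_spec : Claim_equal_dominant_geography_token_py := by
  intro tokens _
  unfold Spec_dominant_geography_token_py
  have hA : dominant_geography_token_py tokens =
      (if ((PySem.Dict.counter ((tokens.map pvNorm).filter pvP)).items).isEmpty = true then none
       else (PySem.List.max2? (PySem.Dict.counter ((tokens.map pvNorm).filter pvP)).items
              (fun it => it.2) (fun it => it.1)).map (fun it => it.1)) := by
    unfold dominant_geography_token_py
    rw [pvCounts_eq]
  have hB : dominant_geography_token_py_alt tokens =
      (if (pvCandidates.filter (fun c => (tokens.map pvNorm).contains c)).isEmpty = true then none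
       else PySem.List.max2? (pvCandidates.filter (fun c => (tokens.map pvNorm).contains c))
              (fun c => ((tokens.map pvNorm).count c : Int)) (fun c => c)) := rfl
  rw [hA, hB, PySem.Dict.items_counter]
  set nl : List String := tokens.map pvNorm with hnl
  set fl : List String := nl.filter pvP with hfl
  set S : List String := PySem.Set.ofList fl with hS
  set present : List String := pvCandidates.filter (fun c => nl.contains c) with hpresent
  have hmemS : ∀ c, c ∈ S → c ∈ nl ∧ c ∈ pvGeoLits := by
    intro c hc
    rw [hS, PySem.Set.mem_ofList, hfl, List.mem_filter] at hc
    exact ⟨hc.1, (pvP_iff c).mp hc.2⟩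
  have hmemS' : ∀ c, c ∈ nl → c ∈ pvGeoLits → c ∈ S := by
    intro c h1 h2
    rw [hS, PySem.Set.mem_ofList, hfl, List.mem_filter]
    exact ⟨h1, (pvP_iff c).mpr h2⟩
  have hmemP : ∀ c, c ∈ present ↔ (c ∈ nl ∧ c ∈ pvGeoLits) := by
    intro c
    rw [hpresent, List.mem_filter, pvMem_candidates, List.contains_iff_mem]
    tauto
  have hcnt : ∀ c, c ∈ pvGeoLits → fl.count c = nl.count c := by
    intro c hc
    rw [hfl]
    exact List.count_filter ((pvP_iff c).mpr hc)
  by_cases hflnil : fl = []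
  · have hSnil : S = [] := by rw [hS, hflnil]; rfl
    have hPnil : present = [] := by
      rw [List.eq_nil_iff_forall_not_mem]
      intro c hc
      obtain ⟨h1, h2⟩ := (hmemP c).mp hc
      have : c ∈ S := hmemS' c h1 h2
      rw [hSnil] at this
      simp at this
    rw [hSnil, hPnil]
    rfl
  · obtain ⟨x, hx⟩ := List.exists_mem_of_ne_nil fl hflnil
    have hxS : x ∈ S := by rw [hS, PySem.Set.mem_ofList]; exact hx
    have hSne : S ≠ [] := fun h => by rw [h] at hxS; simp at hxS
    have hxfl := List.mem_filter.mp (hfl ▸ hx)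
    have hPne : present ≠ [] := by
      intro h
      have : x ∈ present := (hmemP x).mpr ⟨hxfl.1, (pvP_iff x).mp hxfl.2⟩
      rw [h] at this
      simp at this
    have hmapne : S.map (fun k => (k, (fl.count k : Int))) ≠ [] := by
      simp [hSne]
    rw [if_neg (by simp [List.isEmpty_iff]; exact hSne), if_neg (by simp [List.isEmpty_iff]; exact hPne)]
    obtain ⟨itm, hitm⟩ := pvMax2_some (fun it => it.2) (fun it => it.1) hmapne
    obtain ⟨m', hm'⟩ := pvMax2_some (fun c => (nl.count c : Int)) (fun c => c) hPne
    obtain ⟨hitmem, hitall⟩ := pvMax2_spec _ _ hitm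
    obtain ⟨hm'mem, hm'all⟩ := pvMax2_spec _ _ hm'
    obtain ⟨m, hmS, hmpair⟩ := List.mem_map.mp hitmem
    -- m is in present, m' is in S
    obtain ⟨hmnl, hmlits⟩ := hmemS m hmS
    have hmP : m ∈ present := (hmemP m).mpr ⟨hmnl, hmlits⟩
    obtain ⟨hm'nl, hm'lits⟩ := (hmemP m').mp hm'mem
    have hm'S : m' ∈ S := hmemS' m' hm'nl hm'lits
    -- the two maxima agree
    have hb1 := hitall (m', (fl.count m' : Int)) (List.mem_map.mpr ⟨m', hm'S, rfl⟩)
    have hb2 := hm'all m hmP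
    rw [← hmpair] at hb1
    unfold pvKeyLe at hb1 hb2
    simp only at hb1 hb2
    rw [hcnt m hmlits] at hb1
    rw [hcnt m' hm'lits] at hb1
    have hmm' : m = m' := by
      rcases hb1 with hb1 | ⟨hb1e, hb1le⟩ <;> rcases hb2 with hb2 | ⟨hb2e, hb2le⟩
      · omega
      · omega
      · omega
      · exact le_antisymm hb2le hb1le
    rw [hitm, hm', ← hmpair]
    simp [hmm']
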